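-- pv_equiv track=rewrite | github.com/vinilios/zeus | zeus/election_modules/preference/schulze.py | calc_results
-- ===== SOURCE A (Python) =====
-- def calc_results(strengths):
--
--     n = len(strengths)
--
--     wins = []
--     for i in range(n):
--         beaten_candidates = []
--         for j in range(n):
--             if i != j:
--                 if strengths[i][j] > strengths[j][i]:
--                     beaten_candidates.append(j)
--         wins.append(beaten_candidates)
--
--     return wins
-- ===== SOURCE B (Python) =====
-- def calc_results(strengths):
--     n = len(strengths)
--     wins = [[] for _ in range(n)]
--     for i in range(n):
--         for j in range(i + 1, n):
--             sij = strengths[i][j]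
--             sji = strengths[j][i]
--             if sij > sji:
--                 wins[i].append(j)
--             elif sji > sij:
--                 wins[j].append(i)
--     return wins
-- ===== Notes on version B (the rewrite author's own statement) =====
-- stated objective: alternative
-- what changed: B visits each unordered pair (i,j) once and appends the loser's index to the winner's list (relying on outer-loop order to keep each list increasing), instead of A's full n*n scan comparing every ordered pair; intended as a constant-factor saving but a timing run did not confirm it, so it is claimed only as a different algorithm.
import Mathlib
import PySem

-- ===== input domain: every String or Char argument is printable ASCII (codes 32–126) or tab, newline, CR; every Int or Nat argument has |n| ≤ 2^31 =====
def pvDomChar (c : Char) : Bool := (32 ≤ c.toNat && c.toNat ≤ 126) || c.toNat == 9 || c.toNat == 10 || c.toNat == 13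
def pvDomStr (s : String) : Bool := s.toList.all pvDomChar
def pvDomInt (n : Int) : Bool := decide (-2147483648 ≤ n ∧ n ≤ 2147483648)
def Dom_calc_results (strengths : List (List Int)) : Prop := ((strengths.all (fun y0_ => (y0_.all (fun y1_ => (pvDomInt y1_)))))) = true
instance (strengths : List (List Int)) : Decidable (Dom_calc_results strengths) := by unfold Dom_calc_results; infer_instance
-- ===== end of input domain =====

-- B visits each unordered pair once (one comparison per pair instead of A's two); same results, proved equal.

-- ===== PORT A =====
def calc_results (strengths : List (List Int)) : List (List Int) :=
  let n : Int := strengths.length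
  (PySem.List.pyRange 0 n 1).foldl
    (fun wins i =>
      wins ++ [(PySem.List.pyRange 0 n 1).foldl
        (fun bc j =>
          if i ≠ j then
            if PySem.List.pyGetD (PySem.List.pyGetD strengths i []) j 0 >
               PySem.List.pyGetD (PySem.List.pyGetD strengths j []) i 0 then bc ++ [j] else bc
          else bc) []]) []

-- ===== PORT B =====
-- loop indices i, j come from range(...) so they are nonnegative: .toNat is exact here
def calc_results_alt (strengths : List (List Int)) : List (List Int) :=
  let n : Int := strengths.length
  (PySem.List.pyRange 0 n 1).foldl
    (fun wins i =>
      (PySem.List.pyRange (i+1) n 1).foldl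
        (fun w j =>
          let sij := PySem.List.pyGetD (PySem.List.pyGetD strengths i []) j 0
          let sji := PySem.List.pyGetD (PySem.List.pyGetD strengths j []) i 0
          if sij > sji then w.modify i.toNat (fun l => l ++ [j])
          else if sji > sij then w.modify j.toNat (fun l => l ++ [i])
          else w) wins)
    ((PySem.List.pyRange 0 n 1).map (fun _ => ([] : List Int)))

-- ===== PRECONDITION & SPEC =====
-- Pre_: exactly the inputs where every strengths[i][j] access with i ≠ j is in range (Python A raises IndexError otherwise)
def Pre_calc_results (strengths : List (List Int)) : Prop :=
  ∀ i < strengths.length, ∀ j < strengths.length, i ≠ j → j < (strengths.getD i []).length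
instance (strengths : List (List Int)) : Decidable (Pre_calc_results strengths) := by unfold Pre_calc_results; infer_instance
def pvWitness_calc_results : List (List Int) := [[0, 1], [2, 0]]
def Spec_calc_results (strengths : List (List Int)) (out : List (List Int)) : Prop := out = calc_results_alt strengths
instance (strengths : List (List Int)) (out : List (List Int)) : Decidable (Spec_calc_results strengths out) := by unfold Spec_calc_results; infer_instance

-- ===== CLAIM (what is proved, stated in full; the proofs are below) =====
def Claim_equal_calc_results : Prop := ∀ (strengths : List (List Int)), Dom_calc_results strengths → Pre_calc_results strengths → Spec_calc_results strengths (calc_results strengths)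

-- ===== LEMMAS AND PROOFS =====

-- strengths[i][j] (totalized), the comparison, rows and loop states, all over Nat indices
def pvS (s : List (List Int)) (i j : Nat) : Int :=
  PySem.List.pyGetD (PySem.List.pyGetD s (i : Int) []) (j : Int) 0

def pvBt (s : List (List Int)) (i j : Nat) : Bool := decide (pvS s i j > pvS s j i)

def pvRow (s : List (List Int)) (n k : Nat) : List Int :=
  ((List.range n).filter (pvBt s k)).map (fun (j : Nat) => (j : Int))

def pvState (s : List (List Int)) (n t : Nat) : List (List Int) :=
  (List.range n).map (fun k => if k < t then pvRow s n k else pvRow s t k)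

def pvStep (s : List (List Int)) (t : Nat) (w : List (List Int)) (j : Nat) : List (List Int) :=
  if pvBt s t j then w.modify t (fun l => l ++ [(j : Int)])
  else if pvBt s j t then w.modify j (fun l => l ++ [(t : Int)])
  else w

theorem pvBt_irrefl (s : List (List Int)) (k : Nat) : pvBt s k k = false := by
  simp [pvBt]

theorem pvBt_asymm (s : List (List Int)) {i j : Nat} (h : pvBt s i j = true) : pvBt s j i = false := by
  simp [pvBt] at *; omega

theorem pvRange_bridge (n : Nat) :
    PySem.List.pyRange 0 (n : Int) 1 = (List.range n).map (fun (k : Nat) => (k : Int)) := by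
  rw [PySem.List.pyRange_one]
  have h1 : ((n : Int) - 0).toNat = n := by omega
  rw [h1]
  apply List.map_eq_map_iff.mpr
  intro x hx; simp

theorem pvRange_bridge' (t n : Nat) :
    PySem.List.pyRange ((t : Int) + 1) (n : Int) 1
      = (List.range' (t + 1) (n - (t + 1))).map (fun (k : Nat) => (k : Int)) := by
  rw [PySem.List.pyRange_one, List.range'_eq_map_range, List.map_map]
  have h1 : ((n : Int) - ((t : Int) + 1)).toNat = n - (t + 1) := by omega
  rw [h1]
  apply List.map_eq_map_iff.mpr
  intro x hx; simp

theorem pvModify_map_range {α : Type} (n i : Nat) (g : Nat → α) (f : α → α) :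
    ((List.range n).map g).modify i f
      = (List.range n).map (fun k => if k = i then f (g k) else g k) := by
  apply List.ext_getElem (by simp)
  intro j h1 h2
  simp only [List.getElem_modify, List.getElem_map, List.getElem_range]
  by_cases h : i = j
  · simp [h]
  · have hji : j ≠ i := fun h' => h h'.symm
    simp [h, hji]

theorem pvRow_succ (s : List (List Int)) (t k : Nat) :
    pvRow s (t + 1) k = pvRow s t k ++ (if pvBt s k t then [(t : Int)] else []) := by
  unfold pvRow
  rw [List.range_succ, List.filter_append, List.map_append]
  congr 1
  by_cases h : pvBt s k t <;> simp [h]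


theorem pvInner (s : List (List Int)) (n t : Nat) (ht : t < n) (c : Nat) (hc : t + 1 + c ≤ n) :
    (List.range' (t + 1) c).foldl (pvStep s t) (pvState s n t)
      = (List.range n).map (fun k =>
          if k < t then pvRow s n k
          else if k = t then pvRow s t t ++ ((List.range' (t + 1) c).filter (pvBt s t)).map (fun (j : Nat) => (j : Int))
          else if k < t + 1 + c then pvRow s (t + 1) k
          else pvRow s t k) := by
  induction c with
  | zero =>
    simp only [List.range', List.foldl_nil, List.filter_nil, List.map_nil, List.append_nil]
    unfold pvState
    apply List.map_eq_map_iff.mpr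
    intro k hk
    by_cases h1 : k < t
    · simp [h1]
    · by_cases h2 : k = t
      · simp [h2]
      · have h3 : ¬ k < t + 1 + 0 := by omega
        simp [h1, h2, h3]
  | succ c ih =>
    have hc' : t + 1 + c ≤ n := by omega
    rw [List.range'_1_concat, List.foldl_append, ih hc']
    simp only [List.foldl_cons, List.foldl_nil]
    unfold pvStep
    by_cases h1 : pvBt s t (t + 1 + c)
    · rw [if_pos h1, pvModify_map_range]
      apply List.map_eq_map_iff.mpr
      intro k hk
      simp only [List.mem_range] at hk
      by_cases k1 : k < t
      · have : k ≠ t := by omega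
        simp [k1, this]
      · by_cases k2 : k = t
        · simp [k2, h1, List.filter_append, List.append_assoc]
        · by_cases k3 : k < t + 1 + c
          · have k4 : k < t + 1 + (c + 1) := by omega
            simp [k1, k2, k3, k4]
          · by_cases k5 : k = t + 1 + c
            · subst k5
              have k6 : t + 1 + c < t + 1 + (c + 1) := by omega
              simp only [if_neg k1, if_neg k2, if_neg k3, if_pos k6]
              rw [pvRow_succ, pvBt_asymm s h1]
              simp
            · have k6 : ¬ k < t + 1 + (c + 1) := by omega
              simp [k1, k2, k3, k6]
    · rw [if_neg h1]
      by_cases h2 : pvBt s (t + 1 + c) t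
      · rw [if_pos h2, pvModify_map_range]
        apply List.map_eq_map_iff.mpr
        intro k hk
        simp only [List.mem_range] at hk
        by_cases k1 : k < t
        · have : k ≠ t + 1 + c := by omega
          simp [k1, this]
        · by_cases k2 : k = t
          · have hne : t ≠ t + 1 + c := by omega
            simp [k2, h1, hne, List.filter_append]
          · by_cases k3 : k < t + 1 + c
            · have k4 : k < t + 1 + (c + 1) := by omega
              have k5 : k ≠ t + 1 + c := by omega
              simp [k1, k2, k3, k4, k5]
            · by_cases k5 : k = t + 1 + c
              · subst k5
                have k6 : t + 1 + c < t + 1 + (c + 1) := by omega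
                simp only [if_neg k1, if_neg k2, if_neg k3, if_pos k6]
                rw [pvRow_succ]
                simp [h2]
              · have k6 : ¬ k < t + 1 + (c + 1) := by omega
                simp [k1, k2, k3, k5, k6]
      · rw [if_neg h2]
        apply List.map_eq_map_iff.mpr
        intro k hk
        simp only [List.mem_range] at hk
        by_cases k1 : k < t
        · simp [k1]
        · by_cases k2 : k = t
          · simp [k2, h1, List.filter_append]
          · by_cases k3 : k < t + 1 + c
            · have k4 : k < t + 1 + (c + 1) := by omega
              simp [k1, k2, k3, k4]
            · by_cases k5 : k = t + 1 + c
              · subst k5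
                have k6 : t + 1 + c < t + 1 + (c + 1) := by omega
                simp only [if_neg k1, if_neg k2, if_neg k3, if_pos k6]
                rw [pvRow_succ, if_neg (by simpa using h2)]
                simp
              · have k6 : ¬ k < t + 1 + (c + 1) := by omega
                simp [k1, k2, k3, k6]

theorem pvRow_split (s : List (List Int)) (n t : Nat) (ht : t < n) :
    pvRow s n t = pvRow s t t ++ ((List.range' (t + 1) (n - (t + 1))).filter (pvBt s t)).map (fun (j : Nat) => (j : Int)) := by
  unfold pvRow
  have hsplit : List.range n = List.range (t + 1) ++ List.range' (t + 1) (n - (t + 1)) := by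
    rw [List.range_eq_range', List.range_eq_range']
    rw [show n = (t + 1) + (n - (t + 1)) by omega]
    rw [← List.range'_append_1]
    congr 2 <;> omega
  rw [hsplit, List.filter_append, List.map_append, List.range_succ, List.filter_append]
  simp [pvBt_irrefl]

theorem pvOuter (s : List (List Int)) (n t : Nat) (ht : t ≤ n) :
    (List.range t).foldl
      (fun w t' => (List.range' (t' + 1) (n - (t' + 1))).foldl (pvStep s t') w)
      ((List.range n).map (fun _ => ([] : List Int)))
      = pvState s n t := by
  induction t with
  | zero =>
    simp only [List.range_zero, List.foldl_nil]
    unfold pvState pvRow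
    simp
  | succ t ih =>
    have ht' : t < n := by omega
    rw [List.range_succ, List.foldl_append, ih (by omega)]
    simp only [List.foldl_cons, List.foldl_nil]
    rw [pvInner s n t ht' (n - (t + 1)) (by omega)]
    unfold pvState
    apply List.map_eq_map_iff.mpr
    intro k hk
    simp only [List.mem_range] at hk
    by_cases k1 : k < t
    · simp [k1, (by omega : k < t + 1)]
    · by_cases k2 : k = t
      · have hspl := pvRow_split s n t ht'
        simp [k2, hspl]
      · have k3 : k < t + 1 + (n - (t + 1)) := by omega
        have k4 : ¬ k < t + 1 := by omega
        simp [k1, k2, k3, k4]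

theorem pvAlt_eq (s : List (List Int)) :
    calc_results_alt s = pvState s s.length s.length := by
  unfold calc_results_alt
  dsimp only
  rw [pvRange_bridge, List.foldl_map, List.map_map]
  have hbody : (fun (wins : List (List Int)) (t : Nat) =>
      (PySem.List.pyRange ((t : Int) + 1) (s.length : Int) 1).foldl
        (fun w j =>
          let sij := PySem.List.pyGetD (PySem.List.pyGetD s (t : Int) []) j 0
          let sji := PySem.List.pyGetD (PySem.List.pyGetD s j []) (t : Int) 0
          if sij > sji then w.modify (t : Int).toNat (fun l => l ++ [j])
          else if sji > sij then w.modify j.toNat (fun l => l ++ [(t : Int)])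
          else w) wins)
      = (fun w t => (List.range' (t + 1) (s.length - (t + 1))).foldl (pvStep s t) w) := by
    funext wins t
    rw [pvRange_bridge', List.foldl_map]
    congr 1
    funext w j
    simp only [pvStep, pvBt, pvS, Int.toNat_natCast, decide_eq_true_eq]
  rw [hbody]
  simp only [Function.comp_def]
  rw [pvOuter s s.length s.length le_rfl]

theorem pvA_eq (s : List (List Int)) :
    calc_results s = pvState s s.length s.length := by
  unfold calc_results
  dsimp only
  rw [pvRange_bridge, List.foldl_map]
  rw [PySem.List.foldl_append_singleton_eq_map]
  unfold pvState
  apply List.map_eq_map_iff.mpr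
  intro k hk
  simp only [List.mem_range] at hk
  rw [if_pos hk]
  have hstep : (fun (bc : List Int) (j : Int) =>
      if (k : Int) ≠ j then
        if PySem.List.pyGetD (PySem.List.pyGetD s (k : Int) []) j 0 >
           PySem.List.pyGetD (PySem.List.pyGetD s j []) (k : Int) 0 then bc ++ [j] else bc
      else bc)
      = (fun bc j =>
        if ((k : Int) ≠ j ∧ PySem.List.pyGetD (PySem.List.pyGetD s (k : Int) []) j 0 >
           PySem.List.pyGetD (PySem.List.pyGetD s j []) (k : Int) 0) then bc ++ [j] else bc) := by
    funext bc j
    split_ifs <;> first | rfl | (exact absurd (by tauto) (by tauto))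
  rw [hstep, PySem.List.foldl_append_ite_eq_filter, List.filter_map]
  rw [List.nil_append]
  unfold pvRow
  congr 1
  apply List.filter_congr
  intro j hj
  by_cases hjk : j = k
  · subst hjk
    simp [pvBt, pvS]
  · simp only [Function.comp_apply, pvBt, pvS]
    have : ((k : Int) ≠ (j : Int)) := by exact_mod_cast fun h => hjk (by exact_mod_cast h.symm)
    simp [this]

-- ===== VERDICT (by name: the statement is the Claim_ definition above) =====
theorem calc_results_spec : Claim_equal_calc_results := by
  intro s _ _
  unfold Spec_calc_results
  rw [pvA_eq, pvAlt_eq]
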